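-- pv_equiv track=rewrite | github.com/maxineliu2020/payload-free-ids-benchmark | code/cisc650_payload_free_ids_benchmark.py | select_feature_groups
-- ===== SOURCE A (Python) =====
-- from typing import Dict, Iterable, List, Optional, Tuple
--
-- def select_feature_groups(feature_names: List[str]) -> Dict[str, List[int]]:
--     """Group flow features into interpretable categories.
--
--     The grouping is intentionally heuristic because public datasets use a wide
--     range of feature names. The goal is educational interpretation, not a claim
--     that these are the only valid network-feature categories.
--     """
--
--     groups: Dict[str, List[int]] = {
--         "size_based": [],
--         "timing_based": [],
--         "rate_based": [],
--         "flag_window_header": [],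
--     }
--
--     for idx, name in enumerate(feature_names):
--         lower = name.lower()
--         if any(token in lower for token in ["len", "byte", "packet length", "tot", "subflow"]):
--             groups["size_based"].append(idx)
--         if any(token in lower for token in ["iat", "duration", "idle", "active"]):
--             groups["timing_based"].append(idx)
--         if any(token in lower for token in ["rate", "/s", "per second"]):
--             groups["rate_based"].append(idx)
--         if any(token in lower for token in ["flag", "win", "header", "port"]):
--             groups["flag_window_header"].append(idx)
--
--     # Remove empty groups so smaller synthetic experiments do not fail.
--     return {name: indices for name, indices in groups.items() if indices}
-- ===== SOURCE B (Python) =====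
-- # Sort-based grouping: emit (category_rank, index) match records, stable-sort by
-- # rank, then collapse the contiguous runs; A instead mutates four pre-seeded
-- # lists in one indexed pass.
-- CATEGORIES = [
--     ("size_based", ["len", "byte", "packet length", "tot", "subflow"]),
--     ("timing_based", ["iat", "duration", "idle", "active"]),
--     ("rate_based", ["rate", "/s", "per second"]),
--     ("flag_window_header", ["flag", "win", "header", "port"]),
-- ]
--
-- def select_feature_groups(feature_names):
--     pairs = []
--     for i, name in enumerate(feature_names):
--         low = name.lower()
--         for r, (_, tokens) in enumerate(CATEGORIES):
--             if any(t in low for t in tokens):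
--                 pairs.append((r, i))
--     pairs.sort(key=lambda p: p[0])          # stable: indices stay in order
--     runs = []
--     for r, i in pairs:
--         if runs and runs[-1][0] == r:
--             runs[-1][1].append(i)
--         else:
--             runs.append((r, [i]))
--     return {CATEGORIES[r][0]: idxs for r, idxs in runs}
-- ===== Notes on version B (the rewrite author's own statement) =====
-- stated objective: alternative
-- what changed: Replaces A's single pass mutating four pre-seeded dict lists by a sort-based group-by: emit (category_rank, index) match records, stable-sort them by rank, collapse contiguous runs into (rank, indices) groups, then render the runs as the result dict.
import Mathlib
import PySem

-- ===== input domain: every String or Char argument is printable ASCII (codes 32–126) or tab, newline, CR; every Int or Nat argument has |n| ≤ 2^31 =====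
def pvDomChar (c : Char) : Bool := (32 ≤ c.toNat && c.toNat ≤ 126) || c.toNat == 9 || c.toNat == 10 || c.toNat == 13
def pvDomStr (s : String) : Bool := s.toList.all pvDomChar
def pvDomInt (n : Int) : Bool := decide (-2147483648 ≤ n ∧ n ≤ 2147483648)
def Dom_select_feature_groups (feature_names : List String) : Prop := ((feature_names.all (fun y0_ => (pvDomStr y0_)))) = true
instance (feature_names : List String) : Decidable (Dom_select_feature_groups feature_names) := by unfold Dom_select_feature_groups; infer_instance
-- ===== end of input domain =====

-- ===== PORT A =====
-- B groups by a sort of (rank, index) match records instead of A's four mutated lists; proved equal on Dom.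
-- A's dict 'groups' has four fixed literal keys; it is ported as a 4-tuple of index
-- lists updated exactly as A's loop updates the four entries, then the final
-- dict-comprehension filter over the four (name, indices) pairs in insertion order.
def pvMatchesA (tokens : List String) (lower : String) : Bool :=
  tokens.any (fun token => PySem.Str.isIn token lower)

def pvStepA (g : List Int × List Int × List Int × List Int) (p : Int × String) :
    List Int × List Int × List Int × List Int :=
  let lower := PySem.Str.lower p.2
  let s := if pvMatchesA ["len", "byte", "packet length", "tot", "subflow"] lower then g.1 ++ [p.1] else g.1
  let t := if pvMatchesA ["iat", "duration", "idle", "active"] lower then g.2.1 ++ [p.1] else g.2.1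
  let r := if pvMatchesA ["rate", "/s", "per second"] lower then g.2.2.1 ++ [p.1] else g.2.2.1
  let f := if pvMatchesA ["flag", "win", "header", "port"] lower then g.2.2.2 ++ [p.1] else g.2.2.2
  (s, t, r, f)

def select_feature_groups (feature_names : List String) : List (String × List Int) :=
  let g := (PySem.List.enumerate feature_names 0).foldl pvStepA ([], [], [], [])
  ([("size_based", g.1), ("timing_based", g.2.1), ("rate_based", g.2.2.1),
    ("flag_window_header", g.2.2.2)]).filter (fun q => !q.2.isEmpty)

-- ===== PORT B =====
def pvCategories : List (String × List String) :=
  [("size_based", ["len", "byte", "packet length", "tot", "subflow"]),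
   ("timing_based", ["iat", "duration", "idle", "active"]),
   ("rate_based", ["rate", "/s", "per second"]),
   ("flag_window_header", ["flag", "win", "header", "port"])]

-- CATEGORIES[r][0]; r is always a rank produced by enumerate(CATEGORIES), hence in range
def pvCatName (r : Int) : String := (PySem.List.pyGetD pvCategories r ("", [])).1

-- 'if runs and runs[-1][0] == r: runs[-1][1].append(i) else: runs.append((r, [i]))'
def pvGroupStep (runs : List (Int × List Int)) (p : Int × Int) : List (Int × List Int) :=
  match runs.getLast? with
  | some q => if q.1 = p.1 then runs.dropLast ++ [(q.1, q.2 ++ [p.2])] else runs ++ [(p.1, [p.2])]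
  | none => runs ++ [(p.1, [p.2])]

def select_feature_groups_alt (feature_names : List String) : List (String × List Int) :=
  let pairs := (PySem.List.enumerate feature_names 0).foldl (fun acc p =>
    let low := PySem.Str.lower p.2
    (PySem.List.enumerate pvCategories 0).foldl (fun acc2 c =>
      if c.2.2.any (fun t => PySem.Str.isIn t low) then acc2 ++ [(c.1, p.1)] else acc2) acc) []
  let sp := PySem.List.sorted pairs (fun p => p.1) false
  let runs := sp.foldl pvGroupStep []
  -- dict comprehension {CATEGORIES[r][0]: idxs for r, idxs in runs}
  (runs.foldl (fun d q => d.insert (pvCatName q.1) q.2) PySem.Dict.empty).items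

-- ===== PRECONDITION & SPEC =====
def Spec_select_feature_groups (feature_names : List String) (out : List (String × List Int)) : Prop := out = select_feature_groups_alt feature_names
instance (feature_names : List String) (out : List (String × List Int)) : Decidable (Spec_select_feature_groups feature_names out) := by unfold Spec_select_feature_groups; infer_instance

-- ===== CLAIM (what is proved, stated in full; the proofs are below) =====
def Claim_equal_select_feature_groups : Prop := ∀ (feature_names : List String), Dom_select_feature_groups feature_names → Spec_select_feature_groups feature_names (select_feature_groups feature_names)

-- ===== LEMMAS AND PROOFS =====
-- indices matching one token list, in enumeration order
def pvIdxs (tokens : List String) (feature_names : List String) : List Int :=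
  ((PySem.List.enumerate feature_names 0).filter
    (fun il => pvMatchesA tokens (PySem.Str.lower il.2))).map (·.1)

-- the match records one enumerated name contributes
def pvRow (p : Int × String) : List (Int × Int) :=
  (if pvMatchesA ["len", "byte", "packet length", "tot", "subflow"] (PySem.Str.lower p.2) then [((0:Int), p.1)] else []) ++
  (if pvMatchesA ["iat", "duration", "idle", "active"] (PySem.Str.lower p.2) then [((1:Int), p.1)] else []) ++
  (if pvMatchesA ["rate", "/s", "per second"] (PySem.Str.lower p.2) then [((2:Int), p.1)] else []) ++
  (if pvMatchesA ["flag", "win", "header", "port"] (PySem.Str.lower p.2) then [((3:Int), p.1)] else [])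

theorem pvFoldA (l : List (Int × String)) (a b c d : List Int) :
    l.foldl pvStepA (a, b, c, d) =
      (a ++ (l.filter (fun p => pvMatchesA ["len", "byte", "packet length", "tot", "subflow"] (PySem.Str.lower p.2))).map (·.1),
       b ++ (l.filter (fun p => pvMatchesA ["iat", "duration", "idle", "active"] (PySem.Str.lower p.2))).map (·.1),
       c ++ (l.filter (fun p => pvMatchesA ["rate", "/s", "per second"] (PySem.Str.lower p.2))).map (·.1),
       d ++ (l.filter (fun p => pvMatchesA ["flag", "win", "header", "port"] (PySem.Str.lower p.2))).map (·.1)) := by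
  induction l generalizing a b c d with
  | nil => simp
  | cons x xs ih =>
    simp only [List.foldl_cons, List.filter_cons]
    rw [show List.foldl pvStepA (pvStepA (a, b, c, d) x) xs = List.foldl pvStepA
      ((if pvMatchesA ["len", "byte", "packet length", "tot", "subflow"] (PySem.Str.lower x.2) then a ++ [x.1] else a),
       (if pvMatchesA ["iat", "duration", "idle", "active"] (PySem.Str.lower x.2) then b ++ [x.1] else b),
       (if pvMatchesA ["rate", "/s", "per second"] (PySem.Str.lower x.2) then c ++ [x.1] else c),
       (if pvMatchesA ["flag", "win", "header", "port"] (PySem.Str.lower x.2) then d ++ [x.1] else d)) xs from rfl]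
    rw [ih]
    split_ifs <;> simp

theorem pvInnerFold (p : Int × String) (acc : List (Int × Int)) :
    (PySem.List.enumerate pvCategories 0).foldl (fun acc2 c =>
      if c.2.2.any (fun t => PySem.Str.isIn t (PySem.Str.lower p.2)) then acc2 ++ [(c.1, p.1)] else acc2) acc
      = acc ++ pvRow p := by
  simp only [pvCategories, PySem.List.enumerate_cons, PySem.List.enumerate_nil,
    List.foldl_cons, List.foldl_nil, pvRow, pvMatchesA]
  norm_num
  split_ifs <;> simp

theorem pvPairs (feature_names : List String) :
    (PySem.List.enumerate feature_names 0).foldl (fun acc p =>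
      (PySem.List.enumerate pvCategories 0).foldl (fun acc2 c =>
        if c.2.2.any (fun t => PySem.Str.isIn t (PySem.Str.lower p.2)) then acc2 ++ [(c.1, p.1)] else acc2) acc) []
      = (PySem.List.enumerate feature_names 0).flatMap pvRow := by
  exact Eq.trans (PySem.List.foldl_congr_mem _ _ _ _ (fun acc x _ => pvInnerFold x acc))
    (by simpa using PySem.List.foldl_append_eq_flatMap pvRow (PySem.List.enumerate feature_names) [])

theorem pvInsertBy_append (before : Int × Int → Int × Int → Bool) (x : Int × Int)
    (as bs : List (Int × Int)) (h : ∀ a ∈ as, before x a = false) :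
    PySem.List.insertBy before x (as ++ bs) = as ++ PySem.List.insertBy before x bs := by
  induction as with
  | nil => rfl
  | cons a t ih =>
    simp only [List.cons_append, PySem.List.insertBy, h a (List.mem_cons_self),
      Bool.false_eq_true, if_false]
    exact congrArg (a :: ·) (ih (fun y hy => h y (List.mem_cons_of_mem a hy)))

theorem pvInsertBy_front (before : Int × Int → Int × Int → Bool) (x : Int × Int)
    (ys : List (Int × Int)) (h : ∀ y ∈ ys, before x y = true) :
    PySem.List.insertBy before x ys = x :: ys := by
  cases ys with
  | nil => rfl
  | cons y t => simp [PySem.List.insertBy, h y List.mem_cons_self]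

-- one rank's records, in order
def pvF (l : List (Int × Int)) (r : Int) : List (Int × Int) := l.filter (fun p => p.1 == r)

theorem pvF_key {l : List (Int × Int)} {r : Int} {p : Int × Int} (h : p ∈ pvF l r) : p.1 = r := by
  have h' : p ∈ l ∧ p.1 = r := by simpa [pvF] using h
  exact h'.2

theorem pvSortedRank (l : List (Int × Int))
    (h : ∀ p ∈ l, p.1 = 0 ∨ p.1 = 1 ∨ p.1 = 2 ∨ p.1 = 3) :
    PySem.List.sorted l (fun p => p.1) false = pvF l 0 ++ pvF l 1 ++ pvF l 2 ++ pvF l 3 := by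
  induction l using List.reverseRecOn with
  | nil => rfl
  | append_singleton l x ih =>
    have hl : ∀ p ∈ l, p.1 = 0 ∨ p.1 = 1 ∨ p.1 = 2 ∨ p.1 = 3 :=
      fun p hp => h p (by simp [hp])
    rw [PySem.List.sorted_eq_foldl_insertBy, List.foldl_append, List.foldl_cons, List.foldl_nil,
      ← PySem.List.sorted_eq_foldl_insertBy, ih hl]
    have hx := h x (by simp)
    have hF : ∀ j : Int, pvF (l ++ [x]) j = pvF l j ++ if x.1 = j then [x] else [] := by
      intro j
      by_cases hj : x.1 = j <;> simp [pvF, List.filter_append, hj]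
    rcases hx with h0 | h1 | h2 | h3
    · have hsplit : pvF l 0 ++ pvF l 1 ++ pvF l 2 ++ pvF l 3
          = pvF l 0 ++ (pvF l 1 ++ pvF l 2 ++ pvF l 3) := by simp [List.append_assoc]
      rw [hsplit,
        pvInsertBy_append _ _ (pvF l 0) _
          (fun a ha => by have := pvF_key ha; simp [this, h0]),
        pvInsertBy_front _ _ _
          (fun y hy => by
            rcases List.mem_append.1 hy with hy | hy
            · rcases List.mem_append.1 hy with hy | hy
              · have := pvF_key hy; simp [this, h0]
              · have := pvF_key hy; simp [this, h0]
            · have := pvF_key hy; simp [this, h0])]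
      simp [hF, h0]
    · have hsplit : pvF l 0 ++ pvF l 1 ++ pvF l 2 ++ pvF l 3
          = (pvF l 0 ++ pvF l 1) ++ (pvF l 2 ++ pvF l 3) := by simp [List.append_assoc]
      rw [hsplit,
        pvInsertBy_append _ _ (pvF l 0 ++ pvF l 1) _
          (fun a ha => by
            rcases List.mem_append.1 ha with ha | ha
            · have := pvF_key ha; simp [this, h1]
            · have := pvF_key ha; simp [this, h1]),
        pvInsertBy_front _ _ _
          (fun y hy => by
            rcases List.mem_append.1 hy with hy | hy
            · have := pvF_key hy; simp [this, h1]
            · have := pvF_key hy; simp [this, h1])]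
      simp [hF, h1, List.append_assoc]
    · rw [pvInsertBy_append _ _ (pvF l 0 ++ pvF l 1 ++ pvF l 2) _
          (fun a ha => by
            rcases List.mem_append.1 ha with ha | ha
            · rcases List.mem_append.1 ha with ha | ha
              · have := pvF_key ha; simp [this, h2]
              · have := pvF_key ha; simp [this, h2]
            · have := pvF_key ha; simp [this, h2]),
        pvInsertBy_front _ _ _
          (fun y hy => by have := pvF_key hy; simp [this, h2])]
      simp [hF, h2, List.append_assoc]
    · rw [PySem.List.insertBy_of_forall_not_before _ x _
          (fun a ha => by
            rcases List.mem_append.1 ha with ha | ha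
            · rcases List.mem_append.1 ha with ha | ha
              · rcases List.mem_append.1 ha with ha | ha
                · have := pvF_key ha; simp [this, h3]
                · have := pvF_key ha; simp [this, h3]
              · have := pvF_key ha; simp [this, h3]
            · have := pvF_key ha; simp [this, h3])]
      simp [hF, h3, List.append_assoc]

theorem pvRankMem (feature_names : List String) :
    ∀ p ∈ (PySem.List.enumerate feature_names 0).flatMap pvRow,
      p.1 = 0 ∨ p.1 = 1 ∨ p.1 = 2 ∨ p.1 = 3 := by
  intro p hp
  rcases List.mem_flatMap.1 hp with ⟨q, _, hin⟩
  simp only [pvRow, List.mem_append] at hin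
  rcases hin with ((h | h) | h) | h <;> (split_ifs at h <;> simp_all)

theorem pvF_flatMap (l : List (Int × String)) (g : Int × String → List (Int × Int)) (r : Int) :
    pvF (l.flatMap g) r = l.flatMap (fun x => pvF (g x) r) := by
  induction l with
  | nil => rfl
  | cons x xs ih => simp [pvF, List.filter_append] at *; simp [ih]

theorem pvFlatMapIf (l : List (Int × String)) (q : Int × String → Bool) (g : Int × String → Int × Int) :
    l.flatMap (fun p => if q p then [g p] else []) = (l.filter q).map g := by
  induction l with
  | nil => rfl
  | cons x xs ih => by_cases h : q x <;> simp [h, ih]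

theorem pvGroupRun (r : Int) (is : List Int) (items : List (Int × List Int)) (acc : List Int) :
    (is.map (fun i => (r, i))).foldl pvGroupStep (items ++ [(r, acc)]) = items ++ [(r, acc ++ is)] := by
  induction is generalizing acc with
  | nil => simp
  | cons i t ih =>
    have hstep : pvGroupStep (items ++ [(r, acc)]) (r, i) = items ++ [(r, acc ++ [i])] := by
      simp [pvGroupStep]
    simp only [List.map_cons, List.foldl_cons, hstep, ih]
    simp

theorem pvGroupBlock (r : Int) (is : List Int) (items : List (Int × List Int))
    (h : ∀ q ∈ items.getLast?, q.1 ≠ r) (hne : is ≠ []) :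
    (is.map (fun i => (r, i))).foldl pvGroupStep items = items ++ [(r, is)] := by
  cases is with
  | nil => exact absurd rfl hne
  | cons i t =>
    have hstep : pvGroupStep items (r, i) = items ++ [(r, [i])] := by
      unfold pvGroupStep
      cases hl : items.getLast? with
      | none => rfl
      | some q => simp [h q (by simp [hl])]
    simp only [List.map_cons, List.foldl_cons, hstep, pvGroupRun]
    simp


theorem pvRowF0 (p : Int × String) : pvF (pvRow p) 0 =
    if pvMatchesA ["len", "byte", "packet length", "tot", "subflow"] (PySem.Str.lower p.2)
    then [((0:Int), p.1)] else [] := by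
  simp only [pvRow, pvF, List.filter_append]
  split_ifs <;> rfl

theorem pvRowF1 (p : Int × String) : pvF (pvRow p) 1 =
    if pvMatchesA ["iat", "duration", "idle", "active"] (PySem.Str.lower p.2)
    then [((1:Int), p.1)] else [] := by
  simp only [pvRow, pvF, List.filter_append]
  split_ifs <;> rfl

theorem pvRowF2 (p : Int × String) : pvF (pvRow p) 2 =
    if pvMatchesA ["rate", "/s", "per second"] (PySem.Str.lower p.2)
    then [((2:Int), p.1)] else [] := by
  simp only [pvRow, pvF, List.filter_append]
  split_ifs <;> rfl

theorem pvRowF3 (p : Int × String) : pvF (pvRow p) 3 =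
    if pvMatchesA ["flag", "win", "header", "port"] (PySem.Str.lower p.2)
    then [((3:Int), p.1)] else [] := by
  simp only [pvRow, pvF, List.filter_append]
  split_ifs <;> rfl

theorem pvBlockEq (tokens : List String) (r : Int) (feature_names : List String) :
    (PySem.List.enumerate feature_names 0).flatMap
        (fun p => if pvMatchesA tokens (PySem.Str.lower p.2) then [(r, p.1)] else [])
      = (pvIdxs tokens feature_names).map (fun i => (r, i)) := by
  rw [pvFlatMapIf _ _ (fun p => (r, p.1))]
  simp [pvIdxs, List.map_map]

theorem pvAside (feature_names : List String) : select_feature_groups feature_names =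
    ([("size_based", pvIdxs ["len", "byte", "packet length", "tot", "subflow"] feature_names),
      ("timing_based", pvIdxs ["iat", "duration", "idle", "active"] feature_names),
      ("rate_based", pvIdxs ["rate", "/s", "per second"] feature_names),
      ("flag_window_header", pvIdxs ["flag", "win", "header", "port"] feature_names)]).filter
      (fun q => !q.2.isEmpty) := by
  simp only [select_feature_groups, pvFoldA, List.nil_append]
  rfl

theorem pvBside (feature_names : List String) : select_feature_groups_alt feature_names =
    (List.foldl (fun d q => d.insert (pvCatName q.1) q.2) PySem.Dict.empty
      (List.foldl pvGroupStep []
        ((pvIdxs ["len", "byte", "packet length", "tot", "subflow"] feature_names).map (fun i => ((0:Int), i)) ++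
         (pvIdxs ["iat", "duration", "idle", "active"] feature_names).map (fun i => ((1:Int), i)) ++
         (pvIdxs ["rate", "/s", "per second"] feature_names).map (fun i => ((2:Int), i)) ++
         (pvIdxs ["flag", "win", "header", "port"] feature_names).map (fun i => ((3:Int), i))))).items := by
  simp only [select_feature_groups_alt, pvPairs]
  rw [pvSortedRank _ (pvRankMem feature_names)]
  simp only [pvF_flatMap, pvRowF0, pvRowF1, pvRowF2, pvRowF3, pvBlockEq]

theorem pvDictItems (runs : List (Int × List Int))
    (h : (runs.map (fun q => pvCatName q.1)).Nodup) :
    (runs.foldl (fun d q => d.insert (pvCatName q.1) q.2) PySem.Dict.empty).items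
      = runs.map (fun q => (pvCatName q.1, q.2)) := by
  have := PySem.Dict.items_foldl_insert_fresh runs (fun q => pvCatName q.1) (fun q => q.2)
    PySem.Dict.empty (fun a _ => by simp [PySem.Dict.contains_empty]) h
  simpa using this

theorem pvLastNe (items : List (Int × List Int)) (a : Int × List Int) (r : Int)
    (h : a.1 ≠ r) : ∀ q ∈ (items ++ [a]).getLast?, q.1 ≠ r := by
  intro q hq
  rw [List.getLast?_concat, Option.mem_def] at hq
  obtain rfl := Option.some.inj hq
  exact h

theorem pvCatName0 : pvCatName 0 = "size_based" := rfl
theorem pvCatName1 : pvCatName 1 = "timing_based" := rfl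
theorem pvCatName2 : pvCatName 2 = "rate_based" := rfl
theorem pvCatName3 : pvCatName 3 = "flag_window_header" := rfl

-- ===== VERDICT (by name: the statement is the Claim_ definition above) =====
theorem select_feature_groups_spec : Claim_equal_select_feature_groups := by
  intro feature_names _
  show select_feature_groups feature_names = select_feature_groups_alt feature_names
  rw [pvAside, pvBside]
  rw [List.foldl_append, List.foldl_append, List.foldl_append]
  by_cases h0 : pvIdxs ["len", "byte", "packet length", "tot", "subflow"] feature_names = [] <;>
    by_cases h1 : pvIdxs ["iat", "duration", "idle", "active"] feature_names = [] <;>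
      by_cases h2 : pvIdxs ["rate", "/s", "per second"] feature_names = [] <;>
        by_cases h3 : pvIdxs ["flag", "win", "header", "port"] feature_names = []
  all_goals first
    | rw [pvGroupBlock 0 _ _ (by simp) h0]
    | rw [pvGroupBlock 0 _ _ (pvLastNe _ _ _ (by decide)) h0]
    | simp only [h0, List.map_nil, List.foldl_nil]
  all_goals first
    | rw [pvGroupBlock 1 _ _ (by simp) h1]
    | rw [pvGroupBlock 1 _ _ (pvLastNe _ _ _ (by decide)) h1]
    | simp only [h1, List.map_nil, List.foldl_nil]
  all_goals first
    | rw [pvGroupBlock 2 _ _ (by simp) h2]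
    | rw [pvGroupBlock 2 _ _ (pvLastNe _ _ _ (by decide)) h2]
    | simp only [h2, List.map_nil, List.foldl_nil]
  all_goals first
    | rw [pvGroupBlock 3 _ _ (by simp) h3]
    | rw [pvGroupBlock 3 _ _ (pvLastNe _ _ _ (by decide)) h3]
    | simp only [h3, List.map_nil, List.foldl_nil]
  all_goals try rw [pvDictItems _ (by
    simp only [List.map_cons, List.map_nil, List.map_append, List.nil_append, pvCatName0, pvCatName1, pvCatName2, pvCatName3]
    trivial)]
  all_goals simp [h0, h1, h2, h3,
    pvCatName0, pvCatName1, pvCatName2, pvCatName3, PySem.Dict.empty]
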